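-- pv_equiv track=rewrite | github.com/RUNSTR-LLC/Level-Fitness-iOS | agents/chat-pattern-detector.py | _split_into_exchanges
-- ===== SOURCE A (Python) =====
-- from typing import Dict, List, Optional, Tuple
--
-- def _split_into_exchanges(text: str) -> List[str]:
--     """Split conversation into problem-solution exchanges."""
--     # Split by user/assistant markers or timestamps
--     exchanges = []
--     current_exchange = ""
--
--     lines = text.split('\n')
--     for line in lines:
--         if any(pattern in line.lower() for pattern in ["user:", "assistant:", "error:", "fixed:"]):
--             if current_exchange.strip():
--                 exchanges.append(current_exchange.strip())
--             current_exchange = line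
--         else:
--             current_exchange += "\n" + line
--
--     if current_exchange.strip():
--         exchanges.append(current_exchange.strip())
--
--     return exchanges
-- ===== SOURCE B (Python) =====
-- from typing import List
--
-- def _split_into_exchanges(text: str) -> List[str]:
--     patterns = ("user:", "assistant:", "error:", "fixed:")
--     lines = text.split('\n')
--     marks = [i for i, line in enumerate(lines)
--              if any(p in line.lower() for p in patterns)]
--     bounds = [0] + marks + [len(lines)]
--     exchanges = []
--     for a, b in zip(bounds, bounds[1:]):
--         seg = '\n'.join(lines[a:b]).strip()
--         if seg:
--             exchanges.append(seg)
--     return exchanges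
-- ===== Notes on version B (the rewrite author's own statement) =====
-- stated objective: alternative
-- what changed: A's single interleaved accumulate/flush loop building current_exchange by string concatenation is replaced by a two-phase decomposition: one pass collects the marker-line indices, then the line list is sliced at those boundaries and each segment is joined/stripped, keeping the non-empty results.
import Mathlib
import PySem

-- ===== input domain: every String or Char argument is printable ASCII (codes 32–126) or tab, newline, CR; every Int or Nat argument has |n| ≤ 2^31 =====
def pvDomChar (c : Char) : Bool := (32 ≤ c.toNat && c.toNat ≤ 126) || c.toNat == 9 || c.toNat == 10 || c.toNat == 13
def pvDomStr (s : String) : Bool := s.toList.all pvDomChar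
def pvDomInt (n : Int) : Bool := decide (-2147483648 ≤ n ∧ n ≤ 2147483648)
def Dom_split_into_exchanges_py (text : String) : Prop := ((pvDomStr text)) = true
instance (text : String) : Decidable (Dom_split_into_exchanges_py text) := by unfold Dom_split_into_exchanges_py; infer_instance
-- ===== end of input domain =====

-- B replaces A's interleaved accumulate/flush loop (string +=) by a two-phase decomposition:
-- collect the marker-line indices, then slice the line list at those boundaries and join/strip
-- each segment; same return value, objective: alternative decomposition (no speed claim).

-- ===== PORT A =====
-- shared helper: Python's `any(pattern in line.lower() for pattern in ["user:", "assistant:", "error:", "fixed:"])`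
def pvMarker (line : List Char) : Bool :=
  ["user:".toList, "assistant:".toList, "error:".toList, "fixed:".toList].any
    (fun p => PySem.Chars.isIn p (PySem.Chars.lower line))

-- A's loop body: state = (exchanges, current_exchange)
def pvAStep (st : List (List Char) × List Char) (line : List Char) :
    List (List Char) × List Char :=
  if pvMarker line then
    (if PySem.Chars.strip st.2 ≠ [] then st.1 ++ [PySem.Chars.strip st.2] else st.1, line)
  else
    (st.1, st.2 ++ '\n' :: line)

def split_into_exchanges_py (text : String) : List String :=
  let lines := PySem.Chars.splitOn text.toList ['\n']
  let st := lines.foldl pvAStep ([], [])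
  let exchanges :=
    if PySem.Chars.strip st.2 ≠ [] then st.1 ++ [PySem.Chars.strip st.2] else st.1
  exchanges.map String.ofList

-- ===== PORT B =====
def split_into_exchanges_py_alt (text : String) : List String :=
  let lines := PySem.Chars.splitOn text.toList ['\n']
  let marks := ((PySem.List.enumerate lines 0).filter (fun p => pvMarker p.2)).map (·.1)
  let bounds := (0 : Int) :: marks ++ [(lines.length : Int)]
  let out := (bounds.zip bounds.tail).foldl
    (fun out p =>
      let seg := PySem.Chars.strip
        (PySem.Chars.join ['\n'] (PySem.List.slice lines (some p.1) (some p.2)))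
      if seg ≠ [] then out ++ [seg] else out) []
  out.map String.ofList

-- ===== PRECONDITION & SPEC =====
def Spec_split_into_exchanges_py (text : String) (out : List String) : Prop :=
  out = split_into_exchanges_py_alt text
instance (text : String) (out : List String) :
    Decidable (Spec_split_into_exchanges_py text out) := by
  unfold Spec_split_into_exchanges_py; infer_instance

-- ===== CLAIM =====
def Claim_equal_split_into_exchanges_py : Prop :=
  ∀ (text : String), Dom_split_into_exchanges_py text →
    Spec_split_into_exchanges_py text (split_into_exchanges_py text)

-- ===== LEMMAS AND PROOFS =====

-- groups of lines: an initial segment, then one group per marker line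
def pvSpec : List (List Char) → List (List Char) → List (List (List Char))
  | g, [] => [g]
  | g, l :: ls => if pvMarker l then g :: pvSpec [l] ls else pvSpec (g ++ [l]) ls

-- join each group with '\n', strip, drop empties
def pvOut (gs : List (List (List Char))) : List (List Char) :=
  (gs.map (fun g => PySem.Chars.strip (PySem.Chars.join ['\n'] g))).filter (· ≠ [])

-- recursive shape of A's loop
def pvArec (cur : List Char) : List (List Char) → List (List Char)
  | [] => if PySem.Chars.strip cur ≠ [] then [PySem.Chars.strip cur] else []
  | l :: ls =>
      if pvMarker l then
        (if PySem.Chars.strip cur ≠ [] then [PySem.Chars.strip cur] else []) ++ pvArec l ls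
      else pvArec (cur ++ '\n' :: l) ls

-- Nat-valued marker indices, counted from s
def pvIdxs (s : Nat) : List (List Char) → List Nat
  | [] => []
  | l :: ls => if pvMarker l then s :: pvIdxs (s + 1) ls else pvIdxs (s + 1) ls

-- slices of ls between consecutive members of 0 :: cs
def pvSegsOf (ls : List (List Char)) (cs : List Nat) : List (List (List Char)) :=
  ((0 :: cs).zip cs).map (fun p => (ls.drop p.1).take (p.2 - p.1))

theorem pv_strip_cons_nl (s : List Char) :
    PySem.Chars.strip ('\n' :: s) = PySem.Chars.strip s := by
  simp [PySem.Chars.strip, PySem.Chars.lstrip, List.dropWhile_cons,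
    show PySem.Chars.isspace '\n' = true from by decide]

theorem pv_join_append (g : List (List Char)) (l : List Char) (hg : g ≠ []) :
    PySem.Chars.join ['\n'] (g ++ [l]) = PySem.Chars.join ['\n'] g ++ '\n' :: l := by
  induction g with
  | nil => simp at hg
  | cons a t ih =>
      cases t with
      | nil => simp [PySem.Chars.join_cons_cons, PySem.Chars.join_singleton]
      | cons b t' =>
          have ih' := ih (by simp)
          simp only [List.cons_append] at ih' ⊢
          rw [PySem.Chars.join_cons_cons, PySem.Chars.join_cons_cons, ih']
          simp

-- A's foldl, flushed, is pvArec
theorem pv_afold (ls : List (List Char)) (acc : List (List Char)) (cur : List Char) :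
    (let st := ls.foldl pvAStep (acc, cur);
     if PySem.Chars.strip st.2 ≠ [] then st.1 ++ [PySem.Chars.strip st.2] else st.1)
      = acc ++ pvArec cur ls := by
  induction ls generalizing acc cur with
  | nil => simp [pvArec]; split <;> simp
  | cons l ls ih =>
      rw [List.foldl_cons]
      by_cases h : pvMarker l = true
      · have hstep : pvAStep (acc, cur) l =
            ((if PySem.Chars.strip cur ≠ [] then acc ++ [PySem.Chars.strip cur] else acc), l) := by
          simp [pvAStep, h]
        rw [hstep, ih]
        simp only [pvArec, h, if_pos]
        split <;> simp
      · have hstep : pvAStep (acc, cur) l = (acc, cur ++ '\n' :: l) := by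
          simp [pvAStep, h]
        rw [hstep, ih]
        simp [pvArec, h]

-- main A-side invariant: cur is (optional leading '\n') ++ join of the open group
theorem pv_arec_spec (ls : List (List Char)) (g : List (List Char)) (pre : Bool)
    (hg : g ≠ []) :
    pvArec ((if pre then ['\n'] else []) ++ PySem.Chars.join ['\n'] g) ls
      = pvOut (pvSpec g ls) := by
  induction ls generalizing g pre with
  | nil =>
      have hs : PySem.Chars.strip ((if pre then ['\n'] else []) ++ PySem.Chars.join ['\n'] g)
          = PySem.Chars.strip (PySem.Chars.join ['\n'] g) := by
        cases pre <;> simp [pv_strip_cons_nl]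
      simp only [pvArec, pvSpec, pvOut, List.map, List.filter, hs]
      split <;> simp_all
  | cons l ls ih =>
      have hs : PySem.Chars.strip ((if pre then ['\n'] else []) ++ PySem.Chars.join ['\n'] g)
          = PySem.Chars.strip (PySem.Chars.join ['\n'] g) := by
        cases pre <;> simp [pv_strip_cons_nl]
      by_cases h : pvMarker l = true
      · simp only [pvArec, pvSpec, h, if_pos, pvOut, List.map, List.filter, hs]
        have : pvArec l ls = pvOut (pvSpec [l] ls) := by
          have := ih (g := [l]) (pre := false) (by simp)
          simpa [PySem.Chars.join_singleton] using this
        rw [this]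
        simp only [pvOut]
        split <;> simp_all
      · simp only [pvArec, pvSpec, h, if_neg, Bool.false_eq_true, not_false_iff]
        have harg : (if pre then ['\n'] else []) ++ PySem.Chars.join ['\n'] g ++ '\n' :: l
            = (if pre then ['\n'] else []) ++ PySem.Chars.join ['\n'] (g ++ [l]) := by
          rw [pv_join_append g l hg]; simp
        rw [List.append_assoc] at harg ⊢
        rw [harg, ih (g := g ++ [l]) (pre := pre) (by simp)]

-- pvSpec with a seeded group = seed prepended to the head of pvSpec []
theorem pv_spec_seed (ls : List (List Char)) (g : List (List Char)) :
    pvSpec g ls = (g ++ (pvSpec [] ls).headI) :: (pvSpec [] ls).tail := by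
  induction ls generalizing g with
  | nil => simp [pvSpec]
  | cons l ls ih =>
      by_cases h : pvMarker l = true
      · simp [pvSpec, h]
      · simp only [pvSpec, h, Bool.false_eq_true, if_false, List.nil_append]
        rw [ih (g ++ [l]), ih [l]]
        simp

-- enumerate/filter/map marker indices = pvIdxs (cast to Int)
theorem pv_marks_eq (ls : List (List Char)) (s : Nat) :
    (((PySem.List.enumerate ls (s : Int)).filter (fun p => pvMarker p.2)).map (·.1))
      = (pvIdxs s ls).map (fun (n : Nat) => (n : Int)) := by
  induction ls generalizing s with
  | nil => simp [PySem.List.enumerate, pvIdxs]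
  | cons l ls ih =>
      rw [PySem.List.enumerate_cons]
      have ih' := ih (s + 1)
      rw [show (((s + 1 : Nat)) : Int) = (s : Int) + 1 by push_cast; ring] at ih'
      by_cases h : pvMarker l = true <;>
        simp [List.filter_cons, h, pvIdxs, ih']

theorem pv_idxs_shift (ls : List (List Char)) (s : Nat) :
    pvIdxs s ls = (pvIdxs 0 ls).map (· + s) := by
  induction ls generalizing s with
  | nil => simp [pvIdxs]
  | cons l ls ih =>
      by_cases h : pvMarker l = true <;>
      · simp [pvIdxs, h, ih (s + 1), ih 1]
        intro a _
        omega

-- shifted inner pairs slice the tail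
theorem pv_segs_shift_inner (ls : List (List Char)) (l : List Char) (cs : List Nat) (a : Nat) :
    ((((a + 1) :: cs.map (· + 1)).zip (cs.map (· + 1))).map
        (fun p => ((l :: ls).drop p.1).take (p.2 - p.1)))
      = (((a :: cs).zip cs).map (fun p => (ls.drop p.1).take (p.2 - p.1))) := by
  induction cs generalizing a with
  | nil => simp
  | cons c cs ih => simp [List.zip_cons_cons, Nat.succ_sub_succ, ih c]

theorem pv_segsOf_cons (ls : List (List Char)) (l : List Char) (cs : List Nat)
    (hcs : cs ≠ []) :
    pvSegsOf (l :: ls) (cs.map (· + 1))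
      = (l :: (pvSegsOf ls cs).headI) :: (pvSegsOf ls cs).tail := by
  cases cs with
  | nil => simp at hcs
  | cons c cs =>
      simp only [pvSegsOf, List.map_cons, List.zip_cons_cons, List.map, List.drop_zero,
        List.take_succ_cons, List.tail_cons, List.headI]
      rw [pv_segs_shift_inner ls l cs c]
      simp

theorem pv_segsOf_zero (ls : List (List Char)) (cs : List Nat) :
    pvSegsOf ls (0 :: cs) = [] :: pvSegsOf ls cs := by
  simp [pvSegsOf, List.zip_cons_cons]

theorem pv_segsOf_eq_spec (ls : List (List Char)) :
    pvSegsOf ls (pvIdxs 0 ls ++ [ls.length]) = pvSpec [] ls := by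
  induction ls with
  | nil => simp [pvSegsOf, pvIdxs, pvSpec]
  | cons l ls ih =>
      have hlen : (l :: ls).length = ls.length + 1 := rfl
      have hmap : pvIdxs 1 ls ++ [ls.length + 1]
          = (pvIdxs 0 ls ++ [ls.length]).map (· + 1) := by
        rw [pv_idxs_shift ls 1]; simp
      by_cases h : pvMarker l = true
      · have h1 : pvIdxs 0 (l :: ls) = 0 :: pvIdxs 1 ls := by simp [pvIdxs, h]
        have hspec : pvSpec [] (l :: ls) = [] :: pvSpec [l] ls := by simp [pvSpec, h]
        rw [h1, hlen, List.cons_append, pv_segsOf_zero, hmap,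
          pv_segsOf_cons ls l _ (by simp), ih, hspec, pv_spec_seed ls [l]]
        simp
      · have h1 : pvIdxs 0 (l :: ls) = pvIdxs 1 ls := by simp [pvIdxs, h]
        have hspec : pvSpec [] (l :: ls) = pvSpec [l] ls := by simp [pvSpec, h]
        rw [h1, hlen, hmap, pv_segsOf_cons ls l _ (by simp), ih, hspec,
          pv_spec_seed ls [l]]
        simp

-- A's core equals pvOut ∘ pvSpec []
theorem pv_a_core (ls : List (List Char)) :
    pvArec [] ls = pvOut (pvSpec [] ls) := by
  have h0 : PySem.Chars.strip ([] : List Char) = [] := by decide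
  cases ls with
  | nil => simp [pvArec, pvSpec, pvOut, h0, PySem.Chars.join_singleton]
  | cons l ls =>
      by_cases h : pvMarker l = true
      · have hA : pvArec [] (l :: ls) = pvArec l ls := by simp [pvArec, h, h0]
        have hB : pvArec l ls = pvOut (pvSpec [l] ls) := by
          simpa [PySem.Chars.join_singleton] using pv_arec_spec ls [l] false (by simp)
        have hspec : pvSpec [] (l :: ls) = [] :: pvSpec [l] ls := by simp [pvSpec, h]
        rw [hA, hB, hspec]
        simp [pvOut, h0, PySem.Chars.join_nil]
      · have hA : pvArec [] (l :: ls) = pvArec ('\n' :: l) ls := by simp [pvArec, h]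
        have hspec : pvSpec [] (l :: ls) = pvSpec [l] ls := by simp [pvSpec, h]
        rw [hA, hspec]
        simpa [PySem.Chars.join_singleton] using pv_arec_spec ls [l] true (by simp)

-- B's fold over consecutive Nat-cast bounds = pvOut of the drop/take segments
theorem pv_b_fold (ls : List (List Char)) (cs : List Nat) :
    (((cs.map (fun (n : Nat) => (n : Int))).zip ((cs.map (fun (n : Nat) => (n : Int))).tail)).foldl
      (fun out p =>
        let seg := PySem.Chars.strip
          (PySem.Chars.join ['\n'] (PySem.List.slice ls (some p.1) (some p.2)))
        if seg ≠ [] then out ++ [seg] else out) [])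
    = pvOut ((cs.zip cs.tail).map (fun p => (ls.drop p.1).take (p.2 - p.1))) := by
  have hzip : (cs.map (fun (n : Nat) => (n : Int))).zip
        ((cs.map (fun (n : Nat) => (n : Int))).tail)
      = (cs.zip cs.tail).map (Prod.map (fun (n : Nat) => (n : Int)) (fun (n : Nat) => (n : Int))) := by
    rw [← List.map_tail, List.zip_map]
  have hfun : ∀ (out : List (List Char)) (p : Int × Int),
      (let seg := PySem.Chars.strip
          (PySem.Chars.join ['\n'] (PySem.List.slice ls (some p.1) (some p.2)))
       if seg ≠ [] then out ++ [seg] else out)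
      = (if (fun q => decide (PySem.Chars.strip
            (PySem.Chars.join ['\n'] (PySem.List.slice ls (some q.1) (some q.2))) ≠ [])) p
          = true
         then out ++ [(fun q => PySem.Chars.strip
            (PySem.Chars.join ['\n'] (PySem.List.slice ls (some q.1) (some q.2)))) p]
         else out) := by
    intro out p; simp
  rw [hzip]
  simp only [hfun]
  rw [PySem.List.foldl_append_if]
  simp only [List.nil_append, pvOut, List.map_map, List.filter_map, List.map_map]
  have hF : ∀ p : Nat × Nat,
      PySem.Chars.strip (PySem.Chars.join ['\n']
        (PySem.List.slice ls (some (p.1 : Int)) (some (p.2 : Int))))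
      = PySem.Chars.strip (PySem.Chars.join ['\n'] ((ls.drop p.1).take (p.2 - p.1))) := by
    intro p; rw [PySem.List.slice_natCast]
  have e1 : List.filter
        ((fun q => decide (PySem.Chars.strip (PySem.Chars.join ['\n']
            (PySem.List.slice ls (some q.1) (some q.2))) ≠ [])) ∘
          Prod.map (fun (n : Nat) => (n : Int)) (fun (n : Nat) => (n : Int)))
        (cs.zip cs.tail)
      = List.filter
        ((fun x => decide (x ≠ [])) ∘
          ((fun g => PySem.Chars.strip (PySem.Chars.join ['\n'] g)) ∘
            fun p => (ls.drop p.1).take (p.2 - p.1)))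
        (cs.zip cs.tail) := by
    apply List.filter_congr
    intro p _
    simp [Function.comp, Prod.map, hF p]
  rw [e1]
  apply List.map_congr_left
  intro p _
  simp [Function.comp, Prod.map, hF p]

-- ===== VERDICT =====
theorem split_into_exchanges_py_spec : Claim_equal_split_into_exchanges_py := by
  intro text _
  unfold Spec_split_into_exchanges_py split_into_exchanges_py split_into_exchanges_py_alt
  set ls := PySem.Chars.splitOn text.toList ['\n'] with hls
  show List.map String.ofList
      (if PySem.Chars.strip (ls.foldl pvAStep ([], [])).2 ≠ [] then
        (ls.foldl pvAStep ([], [])).1 ++ [PySem.Chars.strip (ls.foldl pvAStep ([], [])).2]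
      else (ls.foldl pvAStep ([], [])).1)
    = List.map String.ofList
      ((((0 : Int) :: ((PySem.List.enumerate ls 0).filter (fun p => pvMarker p.2)).map (·.1)
            ++ [(ls.length : Int)]).zip
        (((0 : Int) :: ((PySem.List.enumerate ls 0).filter (fun p => pvMarker p.2)).map (·.1)
            ++ [(ls.length : Int)]).tail)).foldl
        (fun out p =>
          let seg := PySem.Chars.strip
            (PySem.Chars.join ['\n'] (PySem.List.slice ls (some p.1) (some p.2)))
          if seg ≠ [] then out ++ [seg] else out) [])
  congr 1
  -- A side
  have ha : (if PySem.Chars.strip (ls.foldl pvAStep ([], [])).2 ≠ [] then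
        (ls.foldl pvAStep ([], [])).1 ++ [PySem.Chars.strip (ls.foldl pvAStep ([], [])).2]
      else (ls.foldl pvAStep ([], [])).1) = [] ++ pvArec [] ls := pv_afold ls [] []
  rw [ha, List.nil_append, pv_a_core]
  -- B side
  have hm := pv_marks_eq ls 0
  rw [show (((0 : Nat)) : Int) = (0 : Int) from rfl] at hm
  rw [hm,
    show (0 : Int) :: (pvIdxs 0 ls).map (fun (n : Nat) => (n : Int)) ++ [(ls.length : Int)]
      = ((0 :: (pvIdxs 0 ls ++ [ls.length])).map (fun (n : Nat) => (n : Int))) by simp,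
    pv_b_fold ls (0 :: (pvIdxs 0 ls ++ [ls.length])),
    show (((0 :: (pvIdxs 0 ls ++ [ls.length])).zip
        (0 :: (pvIdxs 0 ls ++ [ls.length])).tail).map
          (fun p => (ls.drop p.1).take (p.2 - p.1)))
      = pvSegsOf ls (pvIdxs 0 ls ++ [ls.length]) from rfl,
    pv_segsOf_eq_spec]
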